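-- pv_equiv track=rewrite | github.com/carolframen/word_game | word_game.py | get_yellow_and_green
-- ===== SOURCE A (Python) =====
-- def get_yellow_and_green (secret, guess, word_length):
--     yellow = 0
--     green = 0
--
--     #Check for yellow: correct digit, wrong place
--     for i in range(word_length):
--         if guess[i] != secret[i] and guess[i] in secret:
--             yellow += 1
--
--     #Check for green: correct digit, correct place
--     for i in range(word_length):
--         if guess[i] == secret[i]:
--             green += 1
--     return green, yellow
-- ===== SOURCE B (Python) =====
-- def get_yellow_and_green(secret, guess, word_length):
--     # Different decomposition: slice+zip the first word_length characters,
--     # filter out the mismatched guess letters, derive green from the lengths,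
--     # and get yellow by iterating over the DISTINCT secret letters, counting
--     # each one's occurrences among the mismatched guesses (order-independent sum).
--     n = max(word_length, 0)
--     pairs = list(zip(secret[:n], guess[:n]))
--     misplaced = [g for s, g in pairs if s != g]
--     green = len(pairs) - len(misplaced)
--     yellow = sum(misplaced.count(c) for c in set(secret))
--     return green, yellow
-- ===== Notes on version B (the rewrite author's own statement) =====
-- stated objective: alternative
-- what changed: Instead of two index loops testing 'equal' and 'unequal-and-member' per position, B slices and zips the two prefixes, filters out the mismatched guess letters, gets green from the length difference, and gets yellow by iterating over the distinct secret letters and summing each one's occurrence count among the mismatches.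
import Mathlib
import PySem

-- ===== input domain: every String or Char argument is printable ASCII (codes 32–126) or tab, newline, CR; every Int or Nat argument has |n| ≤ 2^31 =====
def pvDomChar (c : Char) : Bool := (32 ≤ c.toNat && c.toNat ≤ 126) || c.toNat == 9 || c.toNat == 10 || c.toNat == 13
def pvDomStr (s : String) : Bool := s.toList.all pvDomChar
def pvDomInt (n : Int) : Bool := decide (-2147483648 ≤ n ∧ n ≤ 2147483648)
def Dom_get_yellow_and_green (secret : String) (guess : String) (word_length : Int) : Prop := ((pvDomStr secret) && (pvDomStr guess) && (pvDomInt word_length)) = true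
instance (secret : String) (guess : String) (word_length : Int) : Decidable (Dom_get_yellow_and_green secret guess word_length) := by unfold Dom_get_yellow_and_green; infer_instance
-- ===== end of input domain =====

-- B replaces A's two index loops by: slice+zip the first word_length characters, filter the
-- mismatched guess letters, green = length difference, yellow = sum over the DISTINCT secret
-- letters of their occurrence counts among the mismatches; objective: alternative decomposition.

-- ===== PORT A =====
def get_yellow_and_green (secret : String) (guess : String) (word_length : Int) : List Int :=
  let s := secret.toList
  let gc := fun (i : Int) => (PySem.Str.pyGet? guess i).getD ' '
  let sc := fun (i : Int) => (PySem.Str.pyGet? secret i).getD ' '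
  let yellow : Int := (PySem.List.pyRange 0 word_length 1).foldl
    (fun acc i => if gc i ≠ sc i ∧ gc i ∈ s then acc + 1 else acc) 0
  let green : Int := (PySem.List.pyRange 0 word_length 1).foldl
    (fun acc i => if gc i = sc i then acc + 1 else acc) 0
  [green, yellow]

-- ===== PORT B =====
def get_yellow_and_green_alt (secret : String) (guess : String) (word_length : Int) : List Int :=
  let n : Int := max word_length 0
  let pairs := (PySem.List.slice secret.toList none (some n)).zip
               (PySem.List.slice guess.toList none (some n))
  let misplaced := (pairs.filter (fun p => p.1 != p.2)).map (fun p => p.2)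
  let green : Int := (pairs.length : Int) - (misplaced.length : Int)
  -- sum over a Python set: order-independent (a sum), so exact
  let yellow : Int := (PySem.Set.ofList secret.toList).foldl
    (fun acc c => acc + (misplaced.count c : Int)) 0
  [green, yellow]

-- ===== PRECONDITION & SPEC =====
-- Pre_ excludes exactly the inputs where Python A raises IndexError: word_length beyond either string.
def Pre_get_yellow_and_green (secret : String) (guess : String) (word_length : Int) : Prop :=
  word_length ≤ secret.toList.length ∧ word_length ≤ guess.toList.length
instance (secret : String) (guess : String) (word_length : Int) : Decidable (Pre_get_yellow_and_green secret guess word_length) := by unfold Pre_get_yellow_and_green; infer_instance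
def pvWitness_get_yellow_and_green : String × String × Int := ("cab", "abc", 3)

def Spec_get_yellow_and_green (secret : String) (guess : String) (word_length : Int) (out : List Int) : Prop := out = get_yellow_and_green_alt secret guess word_length
instance (secret : String) (guess : String) (word_length : Int) (out : List Int) : Decidable (Spec_get_yellow_and_green secret guess word_length out) := by unfold Spec_get_yellow_and_green; infer_instance

-- ===== CLAIM (what is proved, stated in full; the proofs are below) =====
def Claim_equal_get_yellow_and_green : Prop := ∀ (secret : String) (guess : String) (word_length : Int), Dom_get_yellow_and_green secret guess word_length → Pre_get_yellow_and_green secret guess word_length → Spec_get_yellow_and_green secret guess word_length (get_yellow_and_green secret guess word_length)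

-- ===== LEMMAS AND PROOFS =====

-- counting x ∈ c :: S splits off x = c when c ∉ S
theorem pvCountPCons (c : Char) (S : List Char) (h : c ∉ S) (xs : List Char) :
    xs.countP (fun x => decide (x ∈ c :: S)) = xs.count c + xs.countP (fun x => decide (x ∈ S)) := by
  induction xs with
  | nil => rfl
  | cons x t ih =>
    simp only [List.countP_cons, List.count_cons, ih]
    by_cases hx : x = c
    · subst hx
      simp [h]
      omega
    · by_cases hm : x ∈ S <;> simp [hx, hm] <;> omega

-- Σ over a duplicate-free S of occurrence counts = number of elements of xs lying in S
theorem pvSumCounts (S : List Char) (hS : S.Nodup) (xs : List Char) :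
    S.foldl (fun acc c => acc + (xs.count c : Int)) 0
      = (xs.countP (fun x => decide (x ∈ S)) : Int) := by
  rw [PySem.List.foldl_add]
  induction S with
  | nil => simp
  | cons c S' ih =>
    rcases List.nodup_cons.mp hS with ⟨hc, hS'⟩
    rw [pvCountPCons c S' hc xs]
    simp only [List.map_cons, List.sum_cons]
    have := ih hS'
    push_cast at this ⊢
    omega

-- counting a per-index predicate over range m = counting it over the zipped m-prefixes
theorem pvCountRangeZip (s g : List Char) (m : Nat) (hs : m ≤ s.length) (hg : m ≤ g.length)
    (Q : Char → Char → Bool) :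
    (List.range m).countP (fun k => Q ((s[k]?).getD ' ') ((g[k]?).getD ' '))
      = ((s.take m).zip (g.take m)).countP (fun p => Q p.1 p.2) := by
  induction m with
  | zero => rfl
  | succ m ih =>
    have hs' : m ≤ s.length := by omega
    have hg' : m ≤ g.length := by omega
    have hsm : m < s.length := by omega
    have hgm : m < g.length := by omega
    rw [List.range_succ, List.countP_append, ih hs' hg',
        List.take_add_one, List.take_add_one,
        List.zip_append (by simp [hs', hg']), List.countP_append]
    simp [List.getElem?_eq_getElem hsm, List.getElem?_eq_getElem hgm]

-- ===== VERDICT (by name: the statement is the Claim_ definition above) =====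
theorem get_yellow_and_green_spec : Claim_equal_get_yellow_and_green := by
  intro secret guess wl _ hpre
  obtain ⟨h1, h2⟩ := hpre
  unfold Spec_get_yellow_and_green get_yellow_and_green get_yellow_and_green_alt
  simp only
  have hms : wl.toNat ≤ secret.toList.length := by omega
  have hmg : wl.toNat ≤ guess.toList.length := by omega
  have hmax : (max wl 0).toNat = wl.toNat := by omega
  rw [PySem.List.slice_to _ (le_max_right wl 0), PySem.List.slice_to _ (le_max_right wl 0), hmax,
      PySem.List.foldl_ite_add_one, PySem.List.foldl_ite_add_one, PySem.List.pyRange_one,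
      pvSumCounts _ (PySem.Set.nodup_ofList secret.toList) _]
  simp only [List.countP_map, Function.comp_def, sub_zero, zero_add, PySem.Str.pyGet?_natCast,
    List.length_map, ← List.countP_eq_length_filter, List.countP_filter]
  have hgreen := pvCountRangeZip secret.toList guess.toList wl.toNat hms hmg
      (fun a b => decide (b = a))
  have hyellow := pvCountRangeZip secret.toList guess.toList wl.toNat hms hmg
      (fun a b => decide (b ≠ a ∧ b ∈ secret.toList))
  beta_reduce at hgreen hyellow
  rw [hgreen, hyellow]
  set pairs := (secret.toList.take wl.toNat).zip (guess.toList.take wl.toNat) with hp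
  have hlen := List.length_eq_countP_add_countP (fun p : Char × Char => p.1 != p.2) (l := pairs)
  have hc1 : pairs.countP (fun p => decide (p.2 = p.1))
      = pairs.countP (fun a => decide ¬((a.1 != a.2) = true)) := by
    refine List.countP_congr ?_
    intro x _
    simp only [decide_eq_true_eq, bne_iff_ne, ne_eq, not_not]
    exact eq_comm
  have hc2 : pairs.countP (fun p => decide (p.2 ∈ PySem.Set.ofList secret.toList) && (p.1 != p.2))
      = pairs.countP (fun p => decide (p.2 ≠ p.1 ∧ p.2 ∈ secret.toList)) := by
    refine List.countP_congr ?_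
    intro x _
    simp only [Bool.and_eq_true, decide_eq_true_eq, bne_iff_ne, ne_eq, PySem.Set.mem_ofList]
    constructor
    · rintro ⟨hm', hne⟩
      exact ⟨fun e => hne e.symm, hm'⟩
    · rintro ⟨hne, hm'⟩
      exact ⟨hm', fun e => hne e.symm⟩
  simp only [List.cons.injEq, and_true]
  constructor
  · omega
  · omega
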